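-- pv_equiv track=rewrite | github.com/dirediredock/Census-Stub | EVAL_EclecticNetworkBenchmark/FIG_CumulativeBMatrix.py | get_BMatrix_size
-- ===== SOURCE A (Python) =====
-- def get_BMatrix_size(list_of_lists):
--     max_length = 0
--     largest_value = float("-inf")
--     for sublist in list_of_lists:
--         sublist_length = len(sublist)
--         if sublist_length > max_length:
--             max_length = sublist_length
--         for value in sublist:
--             if value > largest_value:
--                 largest_value = value
--     if largest_value < 1:
--         return 2, 2
--     else:
--         return max_length, largest_value + 1
-- ===== SOURCE B (Python) =====
-- def _agg(seg):
--     # divide and conquer over a NONEMPTY list of sublists: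
--     # returns (max sublist length, largest value or None if all sublists empty)
--     if len(seg) == 1:
--         s = seg[0]
--         return len(s), (max(s) if s else None)
--     mid = len(seg) // 2
--     len1, max1 = _agg(seg[:mid])
--     len2, max2 = _agg(seg[mid:])
--     if max1 is None:
--         best = max2
--     elif max2 is None:
--         best = max1
--     else:
--         best = max1 if max1 > max2 else max2
--     return (len1 if len1 > len2 else len2), best
--
--
-- def get_BMatrix_size(list_of_lists):
--     if not list_of_lists:
--         return 2, 2
--     ml, lv = _agg(list_of_lists)
--     if lv is None or lv < 1:
--         return 2, 2
--     return ml, lv + 1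
-- ===== Notes on version B (the rewrite author's own statement) =====
-- stated objective: alternative
-- what changed: Replaces A's single left-to-right fused loop with a divide-and-conquer recursion that splits the outer list in half, aggregates (max length, max value) on each half and merges the two results, with the empty case as a None option instead of a float('-inf') sentinel.
import Mathlib
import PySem

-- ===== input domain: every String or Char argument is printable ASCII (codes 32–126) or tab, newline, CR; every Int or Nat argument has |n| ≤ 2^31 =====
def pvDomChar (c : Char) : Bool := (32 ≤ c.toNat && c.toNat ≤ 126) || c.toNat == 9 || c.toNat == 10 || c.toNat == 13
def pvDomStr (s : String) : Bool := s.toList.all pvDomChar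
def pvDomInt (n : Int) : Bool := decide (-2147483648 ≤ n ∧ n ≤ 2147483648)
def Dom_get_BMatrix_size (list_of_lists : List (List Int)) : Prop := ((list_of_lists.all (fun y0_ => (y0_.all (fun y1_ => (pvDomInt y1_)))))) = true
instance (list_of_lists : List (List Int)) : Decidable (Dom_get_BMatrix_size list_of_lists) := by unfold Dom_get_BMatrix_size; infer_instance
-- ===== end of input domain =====

-- B replaces A's single fused left-to-right loop by a divide-and-conquer recursion (split the outer
-- list in half, aggregate each half, merge the two (max length, max value) results); objective: alternative.


-- ===== PORT A =====
-- largest_value starts at float("-inf"); modelled as Option Int (none = -inf, every Int exceeds it)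
-- the body of A's inner 'for value in sublist' loop, as a helper step function
def pvInnerStep (lv : Option Int) (value : Int) : Option Int :=
  match lv with
  | none => some value            -- value > -inf always
  | some x => if value > x then some value else some x

def get_BMatrix_size (list_of_lists : List (List Int)) : Int × Int :=
  let st := list_of_lists.foldl
    (fun (st : Int × Option Int) sublist =>
      ((if (sublist.length : Int) > st.1 then (sublist.length : Int) else st.1),
        sublist.foldl pvInnerStep st.2))
    (0, none)
  match st.2 with
  | none => (2, 2)                         -- -inf < 1
  | some lv => if lv < 1 then (2, 2) else (st.1, lv + 1)

-- ===== PORT B =====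
-- the None-aware merge of the two half-results in Source B's _agg
def pvMerge (o1 o2 : Option Int) : Option Int :=
  match o1, o2 with
  | none, m2 => m2
  | some m1, none => some m1
  | some m1, some m2 => if m1 > m2 then some m1 else some m2

-- Source B's _agg: divide and conquer; Python never calls it on [], the [] case is a totality guard only
def pvAgg : List (List Int) → Int × Option Int
  | [] => (0, none)               -- unreachable from get_BMatrix_size_alt (it guards the empty list)
  | [s] => ((s.length : Int), if s = [] then none else s.max?)
  | a :: b :: rest =>
      match pvAgg ((a :: b :: rest).take ((a :: b :: rest).length / 2)),
            pvAgg ((a :: b :: rest).drop ((a :: b :: rest).length / 2)) with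
      | (len1, max1), (len2, max2) =>
          ((if len1 > len2 then len1 else len2), pvMerge max1 max2)
  termination_by seg => seg.length
  decreasing_by
    · simp only [List.length_take, List.length_cons]; omega
    · simp only [List.length_drop, List.length_cons]; omega

def get_BMatrix_size_alt (list_of_lists : List (List Int)) : Int × Int :=
  if list_of_lists = [] then (2, 2)
  else
    let r := pvAgg list_of_lists
    match r.2 with
    | none => (2, 2)
    | some lv => if lv < 1 then (2, 2) else (r.1, lv + 1)

-- ===== PRECONDITION & SPEC =====
def Spec_get_BMatrix_size (list_of_lists : List (List Int)) (out : Int × Int) : Prop := out = get_BMatrix_size_alt list_of_lists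
instance (list_of_lists : List (List Int)) (out : Int × Int) : Decidable (Spec_get_BMatrix_size list_of_lists out) := by unfold Spec_get_BMatrix_size; infer_instance

-- ===== CLAIM (what is proved, stated in full; the proofs are below) =====
def Claim_equal_get_BMatrix_size : Prop := ∀ (list_of_lists : List (List Int)), Dom_get_BMatrix_size list_of_lists → Spec_get_BMatrix_size list_of_lists (get_BMatrix_size list_of_lists)

-- ===== LEMMAS AND PROOFS =====

theorem pvIf_gt_eq_max (x y : Int) : (if y > x then y else x) = max x y := by
  split <;> omega

-- A's inner loop is a running max in Option form
theorem pvInner_some (xs : List Int) : ∀ (a : Int),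
    xs.foldl pvInnerStep (some a) = some (xs.foldl max a) := by
  induction xs with
  | nil => intro a; rfl
  | cons v t ih =>
      intro a
      have h1 : pvInnerStep (some a) v = some (max a v) := by
        simp only [pvInnerStep]; rw [← pvIf_gt_eq_max]; split <;> rfl
      rw [List.foldl_cons, h1]; exact ih (max a v)

theorem pvInner_none (xs : List Int) : xs.foldl pvInnerStep none = xs.max? := by
  cases xs with
  | nil => rfl
  | cons a t =>
      simp only [List.foldl_cons, pvInnerStep, List.max?_cons']
      exact pvInner_some t a

-- A's fused outer loop splits into the two independent aggregates
theorem pvOuter_split (l : List (List Int)) : ∀ (a : Int) (o : Option Int),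
    l.foldl
      (fun (st : Int × Option Int) sublist =>
        ((if (sublist.length : Int) > st.1 then (sublist.length : Int) else st.1),
          sublist.foldl pvInnerStep st.2)) (a, o)
    = ((l.map (fun s => (s.length : Int))).foldl max a,
       (l.flatMap id).foldl pvInnerStep o) := by
  induction l with
  | nil => intro a o; rfl
  | cons s t ih =>
      intro a o
      simp only [List.foldl_cons, List.map_cons, List.flatMap_cons, id, List.foldl_append]
      rw [pvIf_gt_eq_max]
      exact ih _ _

theorem pvFoldl_max_shift (xs : List Int) : ∀ (a b : Int),
    xs.foldl max (max a b) = max a (xs.foldl max b) := by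
  induction xs with
  | nil => intro a b; rfl
  | cons x t ih =>
      intro a b
      simp only [List.foldl_cons, max_assoc]
      exact ih a (max b x)

theorem pvFoldl_max_init_le (xs : List Int) : ∀ (a : Int), a ≤ xs.foldl max a := by
  induction xs with
  | nil => intro a; exact le_refl a
  | cons x t ih =>
      intro a
      exact le_trans (le_max_left a x) (ih (max a x))

theorem pvMax?_append (A B : List Int) : (A ++ B).max? = pvMerge A.max? B.max? := by
  cases A with
  | nil => simp [pvMerge]
  | cons a t =>
      cases B with
      | nil => simp [pvMerge]
      | cons b u =>
          simp only [List.cons_append, List.max?_cons', List.foldl_append, List.foldl_cons,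
            pvMerge]
          rw [pvFoldl_max_shift]
          split <;> rename_i h <;> congr 1 <;> omega

-- max of lengths is a morphism under append (init 0, all lengths ≥ 0)
theorem pvML_append (A B : List (List Int)) :
    ((A ++ B).map (fun s => (s.length : Int))).foldl max 0
    = max ((A.map (fun s => (s.length : Int))).foldl max 0)
          ((B.map (fun s => (s.length : Int))).foldl max 0) := by
  have h0 : (0:Int) ≤ (A.map (fun s => (s.length : Int))).foldl max 0 :=
    pvFoldl_max_init_le _ 0
  rw [List.map_append, List.foldl_append]
  calc (B.map (fun s => (s.length : Int))).foldl max
          ((A.map (fun s => (s.length : Int))).foldl max 0)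
      = (B.map (fun s => (s.length : Int))).foldl max
          (max ((A.map (fun s => (s.length : Int))).foldl max 0) 0) := by
        rw [max_eq_left h0]
    _ = _ := pvFoldl_max_shift _ _ _

-- B's divide-and-conquer computes exactly the two aggregates
theorem pvAgg_spec (l : List (List Int)) :
    pvAgg l = ((l.map (fun s => (s.length : Int))).foldl max 0, (l.flatMap id).max?) := by
  induction l using pvAgg.induct with
  | case1 => simp [pvAgg]
  | case2 s =>
      simp only [pvAgg, List.map_cons, List.map_nil, List.foldl_cons, List.foldl_nil,
        List.flatMap_cons, List.flatMap_nil, id, List.append_nil, Prod.mk.injEq]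
      refine ⟨?_, ?_⟩
      · rw [max_eq_right (Int.natCast_nonneg _)]
      · cases s <;> simp
  | case3 a b rest len1 max1 len2 max2 hdrop htake ih1 ih2 =>
      rw [htake] at ih1
      rw [hdrop] at ih2
      injection ih1 with h1l h1m
      injection ih2 with h2l h2m
      have hsplit : (a :: b :: rest).take ((a :: b :: rest).length / 2)
          ++ (a :: b :: rest).drop ((a :: b :: rest).length / 2) = (a :: b :: rest) :=
        List.take_append_drop _ _
      rw [pvAgg, htake, hdrop]
      simp only [Prod.mk.injEq]
      refine ⟨?_, ?_⟩
      · rw [h1l, h2l, pvIf_gt_eq_max, max_comm, ← pvML_append, hsplit]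
      · rw [h1m, h2m, ← pvMax?_append, ← List.flatMap_append, hsplit]

-- ===== VERDICT (by name: the statement is the Claim_ definition above) =====
theorem get_BMatrix_size_spec : Claim_equal_get_BMatrix_size := by
  intro l _
  unfold Spec_get_BMatrix_size get_BMatrix_size get_BMatrix_size_alt
  cases l with
  | nil => rfl
  | cons s t =>
      simp only [pvOuter_split, pvInner_none, pvAgg_spec, reduceCtorEq, if_false]
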